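-- pv_equiv track=rewrite | github.com/bsicay/Cifrados-UVG | LABS/LAB2/B/xor.py | xor_binaries
-- ===== SOURCE A (Python) =====
-- def xor_binaries(text_bin, key_bin):
--     """
--     Aplica XOR bit a bit entre dos cadenas binarias.
--     Si key_bin es menor que text_bin, se repite hasta igualar la longitud.
--
--     Args:
--         text_bin (str): Cadena binaria que representa el texto.
--         key_bin (str): Cadena binaria que representa la llave.
--
--     Returns:
--         str: Resultado del XOR en forma de cadena binaria.
--     """
--     # Repetir la llave hasta alcanzar la longitud del texto
--     if len(key_bin) < len(text_bin):
--         repetitions = (len(text_bin) // len(key_bin)) + 1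
--         key_bin = (key_bin * repetitions)[:len(text_bin)]
--     else:
--         key_bin = key_bin[:len(text_bin)]
--
--     # Aplicar XOR bit a bit
--     resultado = []
--     for bit_text, bit_key in zip(text_bin, key_bin):
--         resultado.append(str(int(bit_text) ^ int(bit_key)))
--
--     return ''.join(resultado)
-- ===== SOURCE B (Python) =====
-- def xor_binaries(text_bin, key_bin):
--     """XOR text_bin with key_bin repeated, via modular indexing (no repeated-key string is built)."""
--     n = len(key_bin)
--     out = []
--     for i in range(len(text_bin)):
--         out.append(str(int(text_bin[i]) ^ int(key_bin[i % n])))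
--     return ''.join(out)
-- ===== Notes on version B (the rewrite author's own statement) =====
-- stated objective: simpler
-- what changed: B drops A's length-branch and the materialized repeated-and-truncated key: it indexes the key modularly (key_bin[i % len(key_bin)]) in a single loop over the text positions.
import Mathlib
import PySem

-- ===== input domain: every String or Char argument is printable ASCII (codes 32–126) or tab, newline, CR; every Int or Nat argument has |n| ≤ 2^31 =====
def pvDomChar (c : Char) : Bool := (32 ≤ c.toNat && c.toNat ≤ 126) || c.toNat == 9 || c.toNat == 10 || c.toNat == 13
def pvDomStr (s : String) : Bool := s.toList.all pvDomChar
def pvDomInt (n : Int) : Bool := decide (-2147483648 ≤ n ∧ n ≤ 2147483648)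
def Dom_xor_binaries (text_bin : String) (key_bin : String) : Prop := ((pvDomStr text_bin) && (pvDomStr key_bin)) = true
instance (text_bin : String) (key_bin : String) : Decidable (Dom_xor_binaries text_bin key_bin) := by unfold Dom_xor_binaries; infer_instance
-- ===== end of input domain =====

-- B replaces A's length-branch and materialized repeated-and-truncated key by modular
-- indexing into the original key in one loop over the text (objective: simpler).

-- str(int(a) ^ int(b)) for single characters (shared primitive of both ports)
def pvXorBit (a b : Char) : List Char :=
  (PySem.Int.toStr (PySem.Int.bxor ((PySem.Int.ofStr? (String.ofList [a])).getD 0)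
      ((PySem.Int.ofStr? (String.ofList [b])).getD 0))).toList

-- ===== PORT A =====
def xor_binaries (text_bin : String) (key_bin : String) : String :=
  let t := text_bin.toList
  let k0 := key_bin.toList
  -- repeat-and-truncate the key as A does (the '//' is on nonneg lengths, so Nat '/' is exact;
  -- the k0 = [] ∧ t ≠ [] case raises in Python and is excluded by Pre_)
  let k := if k0.length < t.length then
      (List.flatten (List.replicate (t.length / k0.length + 1) k0)).take t.length
    else k0.take t.length
  let resultado := (t.zip k).foldl (fun acc p => acc ++ [pvXorBit p.1 p.2]) ([] : List (List Char))
  String.ofList resultado.flatten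

-- ===== PORT B =====
def xor_binaries_alt (text_bin : String) (key_bin : String) : String :=
  let t := text_bin.toList
  let k := key_bin.toList
  let n := k.length
  let out := (List.range t.length).foldl
      (fun acc i => acc ++ [pvXorBit (t.getD i ' ') (k.getD (i % n) ' ')]) ([] : List (List Char))
  String.ofList out.flatten

-- ===== PRECONDITION & SPEC =====
-- Pre_ = exactly the inputs where Python A returns: the key must be nonempty when the text is
-- (else ZeroDivisionError), and every character int() sees must be a decimal digit (else ValueError):
-- all of text_bin, and the prefix of key_bin that the zip actually consumes.
def Pre_xor_binaries (text_bin : String) (key_bin : String) : Prop :=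
  (text_bin.toList = [] ∨ key_bin.toList ≠ []) ∧
  text_bin.toList.all Char.isDigit = true ∧
  (key_bin.toList.take (min key_bin.toList.length text_bin.toList.length)).all Char.isDigit = true
instance (text_bin : String) (key_bin : String) : Decidable (Pre_xor_binaries text_bin key_bin) := by
  unfold Pre_xor_binaries; infer_instance
def pvWitness_xor_binaries : String × String := ("1011", "10")

def Spec_xor_binaries (text_bin : String) (key_bin : String) (out : String) : Prop := out = xor_binaries_alt text_bin key_bin
instance (text_bin : String) (key_bin : String) (out : String) : Decidable (Spec_xor_binaries text_bin key_bin out) := by unfold Spec_xor_binaries; infer_instance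

-- ===== CLAIM (what is proved, stated in full; the proofs are below) =====
def Claim_equal_xor_binaries : Prop := ∀ (text_bin : String) (key_bin : String), Dom_xor_binaries text_bin key_bin → Pre_xor_binaries text_bin key_bin → Spec_xor_binaries text_bin key_bin (xor_binaries text_bin key_bin)

-- ===== LEMMAS AND PROOFS =====

theorem pvLt_div_succ_mul (a b : Nat) (hb : 0 < b) : a < (a / b + 1) * b := by
  have h := Nat.div_add_mod a b
  have h2 := Nat.mod_lt a hb
  have h3 : (a / b + 1) * b = b * (a / b) + b := by ring
  omega

-- indexing into a flattened replication is modular indexing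
theorem pvFlatten_replicate_getElem? (k0 : List Char) (m i : Nat) (hi : i < m * k0.length) :
    (List.flatten (List.replicate m k0))[i]? = k0[i % k0.length]? := by
  induction m generalizing i with
  | zero => omega
  | succ m ih =>
    have hm : (m + 1) * k0.length = m * k0.length + k0.length := by ring
    rw [List.replicate_succ, List.flatten_cons]
    by_cases h : i < k0.length
    · rw [List.getElem?_append_left h, Nat.mod_eq_of_lt h]
    · have hn : 0 < k0.length := by
        rcases Nat.eq_zero_or_pos k0.length with h0 | h0
        · rw [h0, Nat.mul_zero] at hi; omega
        · exact h0
      rw [List.getElem?_append_right (by omega)]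
      rw [ih (i - k0.length) (by omega)]
      congr 1
      exact (Nat.mod_eq_sub_mod (by omega)).symm

-- A's extended key, read at position i < |t|, is k0[i % |k0|]
theorem pvKey_getD (t k0 : List Char) (h0 : k0 ≠ [] ∨ t = []) (i : Nat) (hi : i < t.length) :
    (if k0.length < t.length then
        (List.flatten (List.replicate (t.length / k0.length + 1) k0)).take t.length
      else k0.take t.length).getD i ' ' = k0.getD (i % k0.length) ' ' := by
  have hn : 0 < k0.length := by
    rcases h0 with h0 | h0
    · exact List.length_pos_of_ne_nil h0
    · simp [h0] at hi
  rw [List.getD_eq_getElem?_getD, List.getD_eq_getElem?_getD]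
  split
  · rw [List.getElem?_take_of_lt hi,
      pvFlatten_replicate_getElem? k0 _ i (by
        have := pvLt_div_succ_mul t.length k0.length hn
        omega)]
  · next hlt =>
    rw [List.getElem?_take_of_lt hi, Nat.mod_eq_of_lt (by omega)]

-- zip over equal-length lists, mapped, equals mapping over the index range
theorem pvZip_map (t k : List Char) (f : Char × Char → List Char) (hk : k.length = t.length) :
    (t.zip k).map f = (List.range t.length).map (fun i => f (t.getD i ' ', k.getD i ' ')) := by
  apply List.ext_getElem
  · simp [hk]
  · intro i h1 h2
    simp only [List.getElem_map, List.getElem_zip, List.getElem_range]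
    have hi : i < t.length := by simpa [hk] using h1
    rw [List.getD_eq_getElem _ _ (by omega), List.getD_eq_getElem _ _ (by omega)]

-- length of A's extended key
theorem pvKey_len (t k0 : List Char) (h0 : k0 ≠ [] ∨ t = []) :
    (if k0.length < t.length then
        (List.flatten (List.replicate (t.length / k0.length + 1) k0)).take t.length
      else k0.take t.length).length = t.length := by
  rcases h0 with h0 | h0
  · have hn : 0 < k0.length := List.length_pos_of_ne_nil h0
    split
    · next h =>
      simp only [List.length_take, List.length_flatten, List.map_replicate, List.sum_replicate,
        smul_eq_mul]
      have := pvLt_div_succ_mul t.length k0.length hn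
      simp
      omega
    · next h => simp; omega
  · simp [h0]

-- ===== VERDICT (by name: the statement is the Claim_ definition above) =====
theorem xor_binaries_spec : Claim_equal_xor_binaries := by
  intro text_bin key_bin _ hpre
  unfold Spec_xor_binaries
  obtain ⟨h0, -, -⟩ := hpre
  rw [show xor_binaries text_bin key_bin = String.ofList
        (((text_bin.toList.zip
            (if key_bin.toList.length < text_bin.toList.length then
                (List.flatten (List.replicate (text_bin.toList.length / key_bin.toList.length + 1)
                  key_bin.toList)).take text_bin.toList.length
              else key_bin.toList.take text_bin.toList.length)).foldl
            (fun acc p => acc ++ [pvXorBit p.1 p.2]) ([] : List (List Char))).flatten) from rfl]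
  rw [show xor_binaries_alt text_bin key_bin = String.ofList
        (((List.range text_bin.toList.length).foldl
            (fun acc i => acc ++ [pvXorBit (text_bin.toList.getD i ' ')
              (key_bin.toList.getD (i % key_bin.toList.length) ' ')]) ([] : List (List Char))).flatten)
      from rfl]
  rw [PySem.List.foldl_append_singleton_eq_map, PySem.List.foldl_append_singleton_eq_map]
  rw [pvZip_map _ _ _ (pvKey_len _ _ (h0.symm.imp id id))]
  refine congrArg (fun l => String.ofList l.flatten) (List.map_congr_left ?_)
  intro i hi
  exact congrArg (pvXorBit (text_bin.toList.getD i ' '))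
    (pvKey_getD _ _ (h0.symm.imp id id) i (List.mem_range.mp hi))
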